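-- pv_equiv track=rewrite | github.com/Mangern/kattis | ignore/main.py | base7
-- ===== SOURCE A (Python) =====
-- def base7(n):
--     pw = 1
--     cnt = 1
--     while pw*7 <= n:
--         pw *= 7
--         cnt += 1
--     for _ in range(cnt):
--         k = n // pw
--         yield k
--         n -= k * pw
--         pw //= 7
-- ===== SOURCE B (Python) =====
-- def base7(n):
--     digits = []
--     while n >= 7:
--         digits.append(n % 7)
--         n //= 7
--     digits.append(n)
--     for d in reversed(digits):
--         yield d
-- ===== Notes on version B (the rewrite author's own statement) =====
-- stated objective: simpler
-- what changed: B collects digits least-significant-first with repeated % 7 and //= 7 into a list and yields it reversed, instead of A's pre-computation of the highest power of 7 followed by top-down power extraction.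
import Mathlib
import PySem

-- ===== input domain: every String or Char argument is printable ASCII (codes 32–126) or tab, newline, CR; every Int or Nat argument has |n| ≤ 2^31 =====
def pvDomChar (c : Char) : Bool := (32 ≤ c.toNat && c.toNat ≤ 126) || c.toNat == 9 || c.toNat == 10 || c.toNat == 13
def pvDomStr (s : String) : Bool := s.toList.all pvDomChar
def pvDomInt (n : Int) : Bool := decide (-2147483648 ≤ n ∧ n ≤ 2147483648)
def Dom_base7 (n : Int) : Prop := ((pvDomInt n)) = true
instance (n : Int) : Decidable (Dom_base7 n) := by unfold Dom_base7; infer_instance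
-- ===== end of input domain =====

-- B collects base-7 digits least-significant-first (% 7, //= 7) and reverses,
-- instead of A's search for the top power of 7 followed by top-down extraction. Objective: simpler.

-- ===== PORT A =====
-- 'while pw*7 <= n: pw *= 7; cnt += 1' — returns the final (pw, cnt)
def base7Pow (n pw cnt : Int) (h : 0 < pw) : Int × Int :=
  if _hle : pw * 7 ≤ n then
    base7Pow n (pw * 7) (cnt + 1) (by omega)
  else (pw, cnt)
termination_by (n - pw).toNat
decreasing_by omega

-- the generator's list of yields: 'for _ in range(cnt): k = n // pw; yield k; n -= k*pw; pw //= 7'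
def base7 (n : Int) : List Int :=
  let pc := base7Pow n 1 1 (by omega)
  let st := (PySem.List.pyRange 0 pc.2 1).foldl
    (fun (st : Int × Int × List Int) _ =>
      let k := PySem.Int.floordiv st.1 st.2.1
      (st.1 - k * st.2.1, PySem.Int.floordiv st.2.1 7, st.2.2 ++ [k]))
    (n, pc.1, [])
  st.2.2

-- ===== PORT B =====
-- 'while n >= 7: digits.append(n % 7); n //= 7'; then 'digits.append(n)'
def base7Loop (n : Int) (digits : List Int) : List Int :=
  if _h : 7 ≤ n then
    base7Loop (PySem.Int.floordiv n 7) (digits ++ [PySem.Int.mod n 7])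
  else digits ++ [n]
termination_by n.toNat
decreasing_by
  have := PySem.Int.floordiv_lt_iff_lt_mul (a := n) (b := 7) (q := n) (by omega)
  omega

-- 'for d in reversed(digits): yield d'
def base7_alt (n : Int) : List Int := (base7Loop n []).reverse

-- ===== PRECONDITION & SPEC =====
def Spec_base7 (n : Int) (out : List Int) : Prop := out = base7_alt n
instance (n : Int) (out : List Int) : Decidable (Spec_base7 n out) := by unfold Spec_base7; infer_instance

-- ===== CLAIM (what is proved, stated in full; the proofs are below) =====
def Claim_equal_base7 : Prop := ∀ (n : Int), Dom_base7 n → Spec_base7 n (base7 n)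

-- ===== LEMMAS AND PROOFS =====

lemma fdiv_pos (a b : Int) (hb : 0 < b) : PySem.Int.floordiv a b = a / b :=
  PySem.Int.floordiv_eq_ediv_of_pos hb

lemma base7Pow_congr (n pw pw' c : Int) (h : 0 < pw) (h' : 0 < pw') (e : pw = pw') :
    base7Pow n pw c h = base7Pow n pw' c h' := by subst e; rfl

-- recursion form of A's digit-extraction loop (list elements are ignored by the fold)
def runA (m p : Int) : Nat → List Int
  | 0 => []
  | j + 1 =>
    PySem.Int.floordiv m p ::
      runA (m - PySem.Int.floordiv m p * p) (PySem.Int.floordiv p 7) j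

lemma foldA_eq_runA (l : List Int) : ∀ (m p : Int) (acc : List Int),
    (l.foldl
      (fun (st : Int × Int × List Int) _ =>
        let k := PySem.Int.floordiv st.1 st.2.1
        (st.1 - k * st.2.1, PySem.Int.floordiv st.2.1 7, st.2.2 ++ [k]))
      (m, p, acc)).2.2 = acc ++ runA m p l.length := by
  induction l with
  | nil => intro m p acc; simp [runA]
  | cons x xs ih =>
    intro m p acc
    simp only [List.foldl_cons, List.length_cons, runA]
    rw [ih]
    simp

lemma base7_eq_runA (n : Int) :
    base7 n = runA n (base7Pow n 1 1 (by omega)).1 ((base7Pow n 1 1 (by omega)).2).toNat := by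
  unfold base7
  rw [foldA_eq_runA]
  simp [PySem.List.length_pyRange_one]

lemma base7Loop_acc (n : Int) : ∀ acc, base7Loop n acc = acc ++ base7Loop n [] := by
  induction hfuel : n.toNat using Nat.strong_induction_on generalizing n with
  | _ fuel ih =>
    intro acc
    by_cases h : 7 ≤ n
    · have hq : PySem.Int.floordiv n 7 = n / 7 := fdiv_pos _ _ (by omega)
      have hlt : (PySem.Int.floordiv n 7).toNat < fuel := by rw [hq]; omega
      conv_lhs => rw [base7Loop]
      conv_rhs => rw [base7Loop]
      simp only [h, dif_pos]
      rw [ih _ hlt _ rfl (acc ++ [PySem.Int.mod n 7]),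
          ih _ hlt _ rfl (([] : List Int) ++ [PySem.Int.mod n 7])]
      simp
    · conv_lhs => rw [base7Loop]
      conv_rhs => rw [base7Loop]
      simp [h]

lemma alt_low (n : Int) (h : n < 7) : base7_alt n = [n] := by
  unfold base7_alt
  rw [base7Loop]
  simp [show ¬ (7 ≤ n) by omega]

lemma alt_rec (n : Int) (h : 7 ≤ n) :
    base7_alt n = base7_alt (PySem.Int.floordiv n 7) ++ [PySem.Int.mod n 7] := by
  unfold base7_alt
  conv_lhs => rw [base7Loop]
  simp only [h, dif_pos]
  rw [base7Loop_acc]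
  simp

-- base7Pow invariant: starting from pw = 7^k, cnt = k+1 it returns pw' = 7^k', cnt' = k'+1
lemma base7Pow_inv (n : Int) : ∀ (k : Nat) (c : Int) (h : (0:Int) < 7 ^ k),
    c = (k : Int) + 1 →
    ∃ k' : Nat, (base7Pow n (7 ^ k) c h).1 = 7 ^ k' ∧ (base7Pow n (7 ^ k) c h).2 = (k' : Int) + 1 := by
  intro k c h hc
  induction hk : (n - 7 ^ k).toNat using Nat.strong_induction_on generalizing k c with
  | _ fuel ih =>
    rw [base7Pow]
    split
    · rename_i hle
      have hp : (7:Int) ^ k * 7 = 7 ^ (k + 1) := by ring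
      have h7 : (0:Int) < 7 ^ (k + 1) := by positivity
      have e : base7Pow n (7 ^ k * 7) (c + 1) (by omega) =
          base7Pow n (7 ^ (k + 1)) (c + 1) h7 := base7Pow_congr _ _ _ _ _ _ hp
      rw [e]
      have hps : (7:Int) ^ (k + 1) = 7 ^ k * 7 := pow_succ 7 k
      exact ih (n - 7 ^ (k+1)).toNat (by omega) (k+1) (c+1) h7 (by push_cast; omega) rfl
    · exact ⟨k, rfl, by omega⟩

-- bottom-digit peel for A's extraction loop: with p = 7^(j+1) and j+2 steps,
-- the last digit is m % 7 and the rest are the digits of m // 7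
lemma runA_shift : ∀ (j : Nat) (m : Int), 0 ≤ m →
    runA m (7 ^ (j + 1)) (j + 1 + 1) =
      runA (PySem.Int.floordiv m 7) (7 ^ j) (j + 1) ++ [PySem.Int.mod m 7] := by
  intro j
  induction j with
  | zero =>
    intro m hm
    have e1 : (7:Int) ^ (0 + 1) = 7 := by norm_num
    have e0 : (7:Int) ^ (0:Nat) = 1 := by norm_num
    simp only [runA, e1, e0]
    rw [show PySem.Int.floordiv (7:Int) 7 = 1 by decide]
    rw [fdiv_pos _ _ (by omega : (0:Int) < 7), fdiv_pos _ _ one_pos, fdiv_pos _ _ one_pos,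
        PySem.Int.mod_eq_emod_of_pos (by omega : (0:Int) < 7)]
    simp only [Int.ediv_one, List.singleton_append]
    have hmod : m - m / 7 * 7 = m % 7 := by omega
    rw [hmod]
  | succ j ih =>
    intro m hm
    have hp : (0:Int) < 7 ^ (j + 1) := by positivity
    conv_lhs => rw [runA]
    conv_rhs => rw [runA]
    have hd1 : PySem.Int.floordiv (7 ^ (j + 1 + 1)) 7 = 7 ^ (j + 1) := by
      rw [fdiv_pos _ _ (by omega), show (7:Int) ^ (j + 1 + 1) = 7 ^ (j + 1) * 7 by ring]
      exact Int.mul_ediv_cancel _ (by omega)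
    have hd2 : PySem.Int.floordiv (7 ^ (j + 1)) 7 = 7 ^ j := by
      rw [fdiv_pos _ _ (by omega), show (7:Int) ^ (j + 1) = 7 ^ j * 7 by ring]
      exact Int.mul_ediv_cancel _ (by omega)
    have hm7 : PySem.Int.floordiv m 7 = m / 7 := fdiv_pos _ _ (by omega)
    have hhead : PySem.Int.floordiv m (7 ^ (j + 1 + 1)) =
        PySem.Int.floordiv (PySem.Int.floordiv m 7) (7 ^ (j + 1)) := by
      rw [fdiv_pos _ _ (by positivity), hm7, fdiv_pos _ _ hp,
          show (7:Int) ^ (j + 1 + 1) = 7 * 7 ^ (j + 1) by ring]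
      exact (Int.ediv_ediv_of_nonneg (by omega)).symm
    rw [hd1, hd2, hhead]
    set k := PySem.Int.floordiv (PySem.Int.floordiv m 7) (7 ^ (j + 1)) with hk
    have hkval : k = m / 7 / 7 ^ (j + 1) := by rw [hk, hm7, fdiv_pos _ _ hp]
    have hm' : m - k * 7 ^ (j + 1 + 1) = m % (7 * 7 ^ (j + 1)) := by
      rw [Int.emod_def, hkval, Int.ediv_ediv_of_nonneg (by omega : (0:Int) ≤ 7),
          show (7:Int) ^ (j + 1 + 1) = 7 * 7 ^ (j + 1) by ring]
      ring
    have hm'nonneg : 0 ≤ m - k * 7 ^ (j + 1 + 1) := by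
      rw [hm']; exact Int.emod_nonneg m (by positivity)
    rw [ih _ hm'nonneg]
    have e1 : PySem.Int.floordiv (m - k * 7 ^ (j + 1 + 1)) 7 =
        PySem.Int.floordiv m 7 - k * 7 ^ (j + 1) := by
      rw [fdiv_pos _ _ (by omega : (0:Int) < 7), hm7,
          show m - k * 7 ^ (j + 1 + 1) = m + (-(k * 7 ^ (j + 1))) * 7 by ring,
          Int.add_mul_ediv_right _ _ (by omega : (7:Int) ≠ 0)]
      ring
    have e2 : PySem.Int.mod (m - k * 7 ^ (j + 1 + 1)) 7 = PySem.Int.mod m 7 := by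
      rw [PySem.Int.mod_eq_emod_of_pos (by omega), PySem.Int.mod_eq_emod_of_pos (by omega),
          show m - k * 7 ^ (j + 1 + 1) = m - (k * 7 ^ (j + 1)) * 7 by ring]
      exact Int.sub_mul_emod_self_right ..
    rw [e1, e2]
    simp

-- A satisfies B's recursion
lemma base7_rec (n : Int) (h : 7 ≤ n) :
    base7 n = base7 (PySem.Int.floordiv n 7) ++ [PySem.Int.mod n 7] := by
  have hm7 : PySem.Int.floordiv n 7 = n / 7 := fdiv_pos _ _ (by omega)
  obtain ⟨k', hp', hc'⟩ := base7Pow_inv (n / 7) 0 1 (by omega) (by simp)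
  -- the power search on n, after one step, mirrors the power search on n // 7
  have hstep : ∀ (k : Nat) (c : Int) (h7 : (0:Int) < 7 ^ k) (h77 : (0:Int) < 7 ^ (k+1)),
      base7Pow n (7 ^ (k + 1)) (c + 1) h77 =
        ((base7Pow (n / 7) (7 ^ k) c h7).1 * 7, (base7Pow (n / 7) (7 ^ k) c h7).2 + 1) := by
    intro k c h7 h77
    induction hk : (n / 7 - 7 ^ k).toNat using Nat.strong_induction_on generalizing k c with
    | _ fuel ih =>
      have hiff : 7 ^ (k + 1) * 7 ≤ n ↔ 7 ^ k * 7 ≤ n / 7 := by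
        rw [Int.le_ediv_iff_mul_le (by omega : (0:Int) < 7), pow_succ]
      conv_lhs => rw [base7Pow]
      conv_rhs => rw [base7Pow]
      by_cases hle : 7 ^ k * 7 ≤ n / 7
      · rw [dif_pos (hiff.mpr hle), dif_pos hle]
        have ha : (7:Int) ^ (k + 1) * 7 = 7 ^ (k + 1 + 1) := by ring
        have hb : (7:Int) ^ k * 7 = 7 ^ (k + 1) := by ring
        have e1 : base7Pow n (7 ^ (k + 1) * 7) (c + 1 + 1) (by omega) =
            base7Pow n (7 ^ (k + 1 + 1)) (c + 1 + 1) (by positivity) :=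
          base7Pow_congr _ _ _ _ _ _ ha
        have e2 : base7Pow (n / 7) (7 ^ k * 7) (c + 1) (by omega) =
            base7Pow (n / 7) (7 ^ (k + 1)) (c + 1) (by positivity) :=
          base7Pow_congr _ _ _ _ _ _ hb
        rw [e1, e2]
        have hps : (7:Int) ^ (k + 1) = 7 ^ k * 7 := pow_succ 7 k
        exact ih (n / 7 - 7 ^ (k + 1)).toNat (by omega) (k + 1) (c + 1) _ _ rfl
      · rw [dif_neg (fun hc => hle (hiff.mp hc)), dif_neg hle]
        simp [pow_succ]
  have h1 : base7Pow n 1 1 (by omega) = base7Pow n (7 ^ (0 + 1)) (1 + 1) (by norm_num) := by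
    conv_lhs => rw [base7Pow]
    rw [dif_pos (by omega : (1:Int) * 7 ≤ n)]
    exact base7Pow_congr _ _ _ _ _ _ (by norm_num)
  have h2 := hstep 0 1 (by norm_num) (by norm_num)
  have h3 : base7Pow (n / 7) (7 ^ (0:Nat)) 1 (by norm_num) = base7Pow (n / 7) 1 1 (by omega) :=
    base7Pow_congr _ _ _ _ _ _ (by norm_num)
  have hp2 : (base7Pow (n / 7) 1 1 (by omega)).1 = 7 ^ k' := by rw [← h3]; exact hp'
  have hc2 : (base7Pow (n / 7) 1 1 (by omega)).2 = (k' : Int) + 1 := by rw [← h3]; exact hc'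
  rw [base7_eq_runA, base7_eq_runA, hm7, h1, h2, h3, hp2, hc2]
  have hcnt : ((k' : Int) + 1 + 1).toNat = k' + 1 + 1 := by omega
  have hcnt' : ((k' : Int) + 1).toNat = k' + 1 := by omega
  rw [hcnt, hcnt', show (7:Int) ^ k' * 7 = 7 ^ (k' + 1) by ring, runA_shift k' n (by omega), hm7]

lemma base7_low (n : Int) (h : n < 7) : base7 n = [n] := by
  rw [base7_eq_runA]
  have h0 : base7Pow n 1 1 (by omega) = (1, 1) := by
    rw [base7Pow]; rw [dif_neg (by omega)]
  rw [h0]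
  simp [runA]

lemma base7_eq_alt (n : Int) : base7 n = base7_alt n := by
  by_cases h7 : n < 7
  · rw [base7_low n h7, alt_low n h7]
  · have h : 7 ≤ n := by omega
    have hlt : (PySem.Int.floordiv n 7).toNat < n.toNat := by
      rw [fdiv_pos _ _ (by omega)]; omega
    rw [base7_rec n h, alt_rec n h, base7_eq_alt (PySem.Int.floordiv n 7)]
termination_by n.toNat

-- ===== VERDICT (by name: the statement is the Claim_ definition above) =====
theorem base7_spec : Claim_equal_base7 := by
  intro n _
  unfold Spec_base7
  exact base7_eq_alt n
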